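-- pv_equiv track=rewrite | github.com/OTOYO1020/ChatDev_Intermediate | WareHouse/ED_242__20250518045758/palindrome_counter.py | count_palindromic_strings
-- ===== SOURCE A (Python) =====
-- from typing import List, Tuple
--
-- def count_palindromic_strings(T: int, test_cases: List[Tuple[int, str]]) -> List[int]:
--     MOD = 998244353
--     results = []
--     for N, S in test_cases:
--         if N > len(S):
--             results.append(0)  # No valid palindromic strings if N is greater than length of S
--             continue
--         count = 0
--         half_length = (N + 1) // 2
--         # Generate valid palindromic strings
--         for i in range(26 ** half_length):
--             # Generate the first half of the palindrome
--             first_half = []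
--             temp = i
--             for j in range(half_length):
--                 first_half.append(chr((temp % 26) + ord('A')))
--                 temp //= 26
--             # Create the full palindrome
--             if N % 2 == 0:
--                 palindrome = ''.join(first_half + first_half[::-1])
--             else:
--                 palindrome = ''.join(first_half + first_half[-2::-1])
--             # Check if the generated palindrome is valid
--             if palindrome <= S:
--                 count += 1
--                 count %= MOD
--         results.append(count)
--     return results
-- ===== SOURCE B (Python) =====
-- from typing import List, Tuple
--
-- def count_palindromic_strings(T: int, test_cases: List[Tuple[int, str]]) -> List[int]:
--     MOD = 998244353
--     results = []
--     for N, S in test_cases: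
--         if N > len(S):
--             results.append(0)
--             continue
--         half = (N + 1) // 2
--         prefix = S[:half]
--         total = 0
--         tight = True
--         for j, c in enumerate(prefix):
--             if tight:
--                 total += min(max(ord(c) - ord('A'), 0), 26) * 26 ** (half - 1 - j)
--                 tight = 'A' <= c <= 'Z'
--         if tight:
--             if N % 2 == 0:
--                 pal = prefix + prefix[::-1]
--             else:
--                 pal = prefix + prefix[-2::-1]
--             if pal <= S:
--                 total += 1
--         results.append(total % MOD)
--     return results
-- ===== Notes on version B (the rewrite author's own statement) =====
-- stated objective: faster
-- what changed: A enumerates all 26^((N+1)//2) half-strings and tests each generated palindrome against S; B counts in one O(N) pass over the first half of S, adding for each position the number of letters that keep the palindrome below S, plus one final check of the palindrome built from S's own half.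
import Mathlib
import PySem

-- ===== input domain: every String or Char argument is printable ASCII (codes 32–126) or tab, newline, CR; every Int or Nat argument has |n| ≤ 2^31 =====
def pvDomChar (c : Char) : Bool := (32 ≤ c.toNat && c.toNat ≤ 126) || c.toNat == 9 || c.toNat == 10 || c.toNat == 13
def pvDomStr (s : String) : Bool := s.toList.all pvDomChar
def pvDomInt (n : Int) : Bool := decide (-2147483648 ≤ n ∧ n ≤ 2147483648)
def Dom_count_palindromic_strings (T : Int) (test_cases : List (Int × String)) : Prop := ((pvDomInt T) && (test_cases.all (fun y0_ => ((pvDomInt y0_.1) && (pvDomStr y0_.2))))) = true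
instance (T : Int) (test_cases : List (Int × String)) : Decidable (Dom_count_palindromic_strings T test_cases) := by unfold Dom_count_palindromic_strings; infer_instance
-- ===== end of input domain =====

-- B replaces A's exhaustive enumeration of all 26^((N+1)//2) candidate palindromes by a
-- digit-by-digit combinatorial count over the first half of S (objective: faster).

-- Python `x <= y` on strings: by totality it is ¬ (y < x); PySem.Chars.strLt is Python's `<`.
def pyStrLe (x y : List Char) : Bool := !(PySem.Chars.strLt y x)

-- ===== PORT A =====
def count_palindromic_strings (T : Int) (test_cases : List (Int × String)) : List Int :=
  test_cases.foldl (fun results nc =>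
    let N := nc.1
    let S := nc.2.toList
    if N > (S.length : Int) then results ++ [0]
    else
      let half : Int := PySem.Int.floordiv (N + 1) 2
      -- `range(26 ** half_length)`: Pre_ gives half ≥ 0, where `.toNat` is exact
      let count : Int := (PySem.List.pyRange 0 ((26:Int) ^ half.toNat) 1).foldl (fun count i =>
        -- inner loop building first_half; chr((temp % 26) + ord('A')) is Char.ofNat, exact here
        let fh := ((PySem.List.pyRange 0 half 1).foldl
            (fun (st : List Char × Int) _j =>
              (st.1 ++ [Char.ofNat ((PySem.Int.mod st.2 26).toNat + 65)], PySem.Int.floordiv st.2 26))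
            (([] : List Char), i)).1
        -- first_half[::-1] is List.reverse; first_half[-2::-1] is dropLast.reverse (exact for every list)
        let palindrome := if PySem.Int.mod N 2 = 0 then fh ++ fh.reverse else fh ++ fh.dropLast.reverse
        if pyStrLe palindrome S then PySem.Int.mod (count + 1) 998244353 else count) 0
      results ++ [count]) []

-- ===== PORT B =====
def count_palindromic_strings_alt (T : Int) (test_cases : List (Int × String)) : List Int :=
  test_cases.foldl (fun results nc =>
    let N := nc.1
    let S := nc.2.toList
    if N > (S.length : Int) then results ++ [0]
    else
      let half : Int := PySem.Int.floordiv (N + 1) 2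
      let pfx := PySem.List.slice S none (some half)
      let st := (PySem.List.enumerate pfx 0).foldl
        (fun (st : Int × Bool) jc =>
          if st.2 then
            (st.1 + min (max ((jc.2.toNat : Int) - 65) 0) 26 * (26:Int) ^ (half - 1 - jc.1).toNat,
             decide ('A' ≤ jc.2 ∧ jc.2 ≤ 'Z'))
          else st) (0, true)
      let total :=
        if st.2 then
          let pal := if PySem.Int.mod N 2 = 0 then pfx ++ pfx.reverse else pfx ++ pfx.dropLast.reverse
          if pyStrLe pal S then st.1 + 1 else st.1
        else st.1
      results ++ [PySem.Int.mod total 998244353]) []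

-- ===== PRECONDITION & SPEC =====
-- Pre_ excludes exactly the test cases with N ≤ -2: there half_length is negative, 26 ** half_length
-- is a float and Python's range() raises TypeError.  (For every N ≥ -1 the Python A returns.)
def Pre_count_palindromic_strings (T : Int) (test_cases : List (Int × String)) : Prop :=
  ∀ p ∈ test_cases, (-1 : Int) ≤ p.1
instance (T : Int) (test_cases : List (Int × String)) : Decidable (Pre_count_palindromic_strings T test_cases) := by unfold Pre_count_palindromic_strings; infer_instance

def pvWitness_count_palindromic_strings : Int × (List (Int × String)) :=
  (1, [(2, "BB"), (0, "A"), (5, "HI"), (3, "CAb")])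

def Spec_count_palindromic_strings (T : Int) (test_cases : List (Int × String)) (out : List Int) : Prop := out = count_palindromic_strings_alt T test_cases
instance (T : Int) (test_cases : List (Int × String)) (out : List Int) : Decidable (Spec_count_palindromic_strings T test_cases out) := by unfold Spec_count_palindromic_strings; infer_instance

-- ===== CLAIM (what is proved, stated in full; the proofs are below) =====
def Claim_equal_count_palindromic_strings : Prop := ∀ (T : Int) (test_cases : List (Int × String)), Dom_count_palindromic_strings T test_cases → Pre_count_palindromic_strings T test_cases → Spec_count_palindromic_strings T test_cases (count_palindromic_strings T test_cases)

-- ===== LEMMAS AND PROOFS =====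

-- proof-side vocabulary ----------------------------------------------------
/-- the r-th upper-case letter, `chr(r + ord('A'))`. -/
def achr (r : Nat) : Char := Char.ofNat (r + 65)

/-- A's little-endian base-26 decoding of `t` into `n` letters. -/
def decN : Nat → Nat → List Char
  | 0, _ => []
  | n+1, t => achr (t % 26) :: decN n (t / 26)

/-- strict lexicographic comparison of two equal-length char lists. -/
def lexLt : List Char → List Char → Bool
  | x :: xs, y :: ys => decide (x < y) || (decide (x = y) && lexLt xs ys)
  | _, _ => false

def isAZ (t : Char) : Bool := decide ('A' ≤ t ∧ t ≤ 'Z')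

/-- number of upper-case letters strictly below `t`. -/
def lowerN (t : Char) : Nat := min 26 (t.toNat - 65)

/-- B's closed-form count of half-strings lexicographically below the target. -/
def CL : List Char → Nat
  | [] => 0
  | t :: T' => lowerN t * 26 ^ T'.length + (if isAZ t then CL T' else 0)

/-- the full palindrome grown from a half-string (parity taken from N). -/
def palF (N : Int) (h : List Char) : List Char :=
  if PySem.Int.mod N 2 = 0 then h ++ h.reverse else h ++ h.dropLast.reverse

-- basic facts --------------------------------------------------------------
lemma length_decN (n t : Nat) : (decN n t).length = n := by
  induction n generalizing t with
  | zero => rfl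
  | succ n ih => simp [decN, ih]

lemma char_lt_iff (a b : Char) : a < b ↔ a.toNat < b.toNat := by
  rw [Char.lt_def, UInt32.lt_iff_toNat_lt]; rfl

lemma char_eq_iff (a b : Char) : a = b ↔ a.toNat = b.toNat := by
  constructor
  · rintro rfl; rfl
  · intro h; exact Char.ext (UInt32.toNat_inj.mp h)

lemma char_le_iff (a b : Char) : a ≤ b ↔ a.toNat ≤ b.toNat := by
  rw [Char.le_def, UInt32.le_iff_toNat_le]; rfl

lemma achr_toNat (r : Nat) (h : r < 26) : (achr r).toNat = r + 65 := by
  have h2 : r + 65 < 55296 := by omega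
  simp [achr, Char.toNat_ofNat, Nat.isValidChar, h2]

lemma isAZ_eq (t : Char) : isAZ t = (decide (65 ≤ t.toNat) && decide (t.toNat < 91)) := by
  have hA : ('A' : Char).toNat = 65 := rfl
  have hZ : ('Z' : Char).toNat = 90 := rfl
  rw [isAZ, ← Bool.decide_and]
  apply decide_eq_decide.mpr
  rw [char_le_iff, char_le_iff, hA, hZ]
  omega

lemma mod_toNat_26 (t : Int) (ht : 0 ≤ t) : PySem.Int.mod t 26 = ((t.toNat % 26 : Nat) : Int) := by
  rw [← Int.toNat_of_nonneg ht]; exact_mod_cast PySem.Int.mod_natCast t.toNat 26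

lemma floordiv_toNat_26 (t : Int) (ht : 0 ≤ t) :
    PySem.Int.floordiv t 26 = ((t.toNat / 26 : Nat) : Int) := by
  rw [← Int.toNat_of_nonneg ht]; exact_mod_cast PySem.Int.floordiv_natCast t.toNat 26

-- the inner loop of A builds exactly `decN` -------------------------------
lemma A1 (l : List Int) (acc : List Char) (t : Int) (ht : 0 ≤ t) :
    (l.foldl
      (fun (st : List Char × Int) _ =>
        (st.1 ++ [Char.ofNat ((PySem.Int.mod st.2 26).toNat + 65)], PySem.Int.floordiv st.2 26))
      (acc, t)).1 = acc ++ decN l.length t.toNat := by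
  induction l generalizing acc t with
  | nil => simp [decN]
  | cons x l ih =>
      simp only [List.foldl_cons, List.length_cons]
      rw [ih _ _ (by rw [floordiv_toNat_26 t ht]; exact Int.natCast_nonneg _)]
      rw [mod_toNat_26 t ht, floordiv_toNat_26 t ht, Int.toNat_natCast, Int.toNat_natCast]
      simp [decN, achr, List.append_assoc]

-- A's counting loop is a countP mod 998244353 ------------------------------
lemma A2 (l : List Int) (p : Int → Bool) (c : Int) (h0 : 0 ≤ c) (h1 : c < 998244353) :
    l.foldl (fun c i => if p i then PySem.Int.mod (c + 1) 998244353 else c) c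
      = PySem.Int.mod (c + l.countP p) 998244353 := by
  have hM : (0:Int) < 998244353 := by norm_num
  induction l generalizing c with
  | nil =>
      simp [PySem.Int.mod_eq_emod_of_pos hM, Int.emod_eq_of_lt h0 h1]
  | cons x l ih =>
      by_cases hx : p x = true
      · simp only [List.foldl_cons, hx, if_true]
        rw [ih _ (PySem.Int.mod_nonneg _ hM) (PySem.Int.mod_lt _ hM)]
        rw [PySem.Int.mod_eq_emod_of_pos hM, PySem.Int.mod_eq_emod_of_pos hM,
            PySem.Int.mod_eq_emod_of_pos hM, List.countP_cons]
        simp only [hx, if_true]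
        have hmm : ((c + 1) % 998244353 + (l.countP p : Int)) % 998244353
            = ((c + 1) + (l.countP p : Int)) % 998244353 := by
          conv_rhs => rw [Int.add_emod]
          rw [Int.add_emod, Int.emod_emod_of_dvd _ dvd_rfl]
        rw [hmm]
        congr 1
        push_cast
        ring
      · simp only [List.foldl_cons, hx, if_false, Bool.false_eq_true]
        rw [ih _ h0 h1, List.countP_cons]
        simp [hx]

-- B's loop with the tight flag computes CL ---------------------------------
lemma B0 (half : Int) (l : List (Int × Char)) (x : Int) :
    l.foldl (fun (st : Int × Bool) jc =>
        if st.2 then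
          (st.1 + min (max ((jc.2.toNat : Int) - 65) 0) 26 * (26:Int) ^ (half - 1 - jc.1).toNat,
           decide ('A' ≤ jc.2 ∧ jc.2 ≤ 'Z'))
        else st) (x, false) = (x, false) := by
  induction l generalizing x with
  | nil => rfl
  | cons a l ih =>
      rw [List.foldl_cons]
      exact ih x

lemma B1 (half : Int) (cs : List Char) (a : Int) (acc : Int) (hh : half = a + cs.length) :
    ((PySem.List.enumerate cs a).foldl
      (fun (st : Int × Bool) jc =>
        if st.2 then
          (st.1 + min (max ((jc.2.toNat : Int) - 65) 0) 26 * (26:Int) ^ (half - 1 - jc.1).toNat,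
           decide ('A' ≤ jc.2 ∧ jc.2 ≤ 'Z'))
        else st) (acc, true))
      = (acc + (CL cs : Int), cs.all isAZ) := by
  induction cs generalizing a acc with
  | nil => simp [PySem.List.enumerate_nil, CL]
  | cons t cs ih =>
      rw [PySem.List.enumerate_cons, List.foldl_cons]
      dsimp only
      have hexp : (half - 1 - a).toNat = cs.length := by
        simp only [List.length_cons] at hh; omega
      have hlow : min (max ((t.toNat : Int) - 65) 0) 26 = (lowerN t : Int) := by
        unfold lowerN
        rw [Nat.cast_min]
        push_cast
        rcases Nat.le_total t.toNat 65 with h | h <;> omega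
      have hflag : decide ('A' ≤ t ∧ t ≤ 'Z') = isAZ t := rfl
      rw [hexp, hlow, hflag, if_pos rfl]
      cases hA : isAZ t with
      | true =>
          rw [ih (a + 1) _ (by simp only [List.length_cons] at hh; push_cast; omega)]
          simp only [CL, hA, if_true, List.all_cons, Bool.true_and, Prod.mk.injEq]
          refine ⟨?_, trivial⟩
          push_cast
          ring
      | false =>
          rw [B0 half]
          simp only [CL, hA, if_false, List.all_cons, Bool.false_and, Prod.mk.injEq]
          refine ⟨?_, trivial⟩
          push_cast
          ring

-- first-difference principle for Python's string ≤ -------------------------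
lemma pyStrLe_cons (x y : Char) (X Y : List Char) :
    pyStrLe (x :: X) (y :: Y)
      = (if y < x then false else if y = x then pyStrLe X Y else true) := by
  by_cases h1 : y < x <;> by_cases h2 : y = x <;>
    simp [pyStrLe, PySem.Chars.strLt, List.cons_lt_cons_iff, h1, h2]

lemma LD (m : Nat) (X Y : List Char) (hX : m ≤ X.length) (hY : m ≤ Y.length)
    (hne : X.take m ≠ Y.take m) : pyStrLe X Y = lexLt (X.take m) (Y.take m) := by
  induction m generalizing X Y with
  | zero => simp at hne
  | succ m ih =>
      match X, Y with
      | [], _ => simp at hX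
      | _ :: _, [] => simp at hY
      | x :: X', y :: Y' =>
        simp only [List.take_succ_cons] at hne ⊢
        rw [pyStrLe_cons]
        by_cases hxy : x = y
        · subst hxy
          rw [if_neg (lt_irrefl x), if_pos rfl]
          have hne' : X'.take m ≠ Y'.take m := fun h => hne (by rw [h])
          have hih := ih X' Y' (by simpa using hX) (by simpa using hY) hne'
          simp only [lexLt, decide_eq_false (lt_irrefl x), decide_eq_true (rfl : x = x),
            Bool.false_or, Bool.true_and]
          exact hih
        · rcases lt_trichotomy x y with h | h | h
          · rw [if_neg (lt_asymm h), if_neg (fun he => hxy he.symm)]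
            simp [lexLt, decide_eq_true h]
          · exact absurd h hxy
          · rw [if_pos h]
            simp [lexLt, decide_eq_false (lt_asymm h), decide_eq_false hxy]

-- counting a block of 26 ---------------------------------------------------
lemma Km (t : Char) (b : Bool) (m : Nat) (hm : m ≤ 26) :
    (List.range m).countP (fun r => if achr r = t then b else decide (achr r < t))
      = min m (t.toNat - 65)
        + (if (decide (65 ≤ t.toNat) && decide (t.toNat < 65 + m) && b) then 1 else 0) := by
  induction m with
  | zero => cases b <;> simp
  | succ m ih =>
      rw [List.range_succ, List.countP_append, ih (by omega)]
      have hc : (achr m).toNat = m + 65 := achr_toNat m (by omega)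
      have heq : (achr m = t) ↔ (m + 65 = t.toNat) := by rw [char_eq_iff, hc]
      have hlt : (achr m < t) ↔ (m + 65 < t.toNat) := by rw [char_lt_iff, hc]
      simp only [List.countP_cons, List.countP_nil, Nat.zero_add]
      simp only [heq, hlt]
      cases b <;> simp <;> split_ifs <;> omega

lemma K (t : Char) (b : Bool) :
    (List.range 26).countP (fun r => if achr r = t then b else decide (achr r < t))
      = lowerN t + (if isAZ t && b then 1 else 0) := by
  rw [Km t b 26 (le_refl 26), isAZ_eq]
  norm_num [lowerN]

-- splitting a range into blocks of 26 --------------------------------------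
lemma RML (a : Nat) (g : Nat → Bool) (c : Nat) (hq : Nat → Bool)
    (h : ∀ q, q < a → (List.range 26).countP (fun r => g (q * 26 + r)) = c + (if hq q then 1 else 0)) :
    (List.range (a * 26)).countP g = a * c + (List.range a).countP hq := by
  induction a with
  | zero => simp
  | succ a ih =>
      have h26 : (a + 1) * 26 = a * 26 + 26 := by ring
      rw [h26, List.range_add, List.countP_append, ih (fun q hq' => h q (by omega))]
      have hmap : ((List.range 26).map (a * 26 + ·)).countP g
          = (List.range 26).countP (fun r => g (a * 26 + r)) := by
        rw [List.countP_map]; rfl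
      rw [hmap, h a (by omega), List.range_succ, List.countP_append]
      simp only [List.countP_cons, List.countP_nil, Nat.zero_add, Nat.succ_mul]
      ring

-- the main combinatorial identity ------------------------------------------
lemma G (Tn : List Char) : ∀ (P : List Char → Bool),
    (∀ h : List Char, h.length = Tn.length → h ≠ Tn → P h = lexLt h Tn) →
    (List.range (26 ^ Tn.length)).countP (fun k => P (decN Tn.length k))
      = CL Tn + (if Tn.all isAZ && P Tn then 1 else 0) := by
  induction Tn with
  | nil =>
      intro P _
      simp only [List.length_nil, pow_zero, List.range_one, List.countP_cons, List.countP_nil,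
        CL, List.all_nil, Bool.true_and, Nat.zero_add]
      cases h : P [] <;> simp [decN, h]
  | cons t T' ih =>
      intro P hP
      have hlen : (t :: T').length = T'.length + 1 := rfl
      rw [hlen, pow_succ]
      rw [RML (26 ^ T'.length) (fun k => P (decN (T'.length + 1) k)) (lowerN t)
        (fun q => isAZ t && P (t :: decN T'.length q))
        (by
          intro q hq
          have hcongr : ∀ r ∈ List.range 26,
              ((fun r => (fun k => P (decN (T'.length + 1) k)) (q * 26 + r)) r = true)
                ↔ ((fun r => if achr r = t then P (t :: decN T'.length q)
                    else decide (achr r < t)) r = true) := by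
            intro r hr
            have hr26 : r < 26 := List.mem_range.mp hr
            have hmod : (q * 26 + r) % 26 = r := by omega
            have hdiv : (q * 26 + r) / 26 = q := by omega
            have hdec : decN (T'.length + 1) (q * 26 + r) = achr r :: decN T'.length q := by
              simp [decN, hmod, hdiv]
            simp only [hdec]
            by_cases hr_t : achr r = t
            · rw [hr_t, if_pos rfl]
            · rw [if_neg hr_t]
              have hPh := hP (achr r :: decN T'.length q)
                (by simp [length_decN])
                (fun hcontra => hr_t (by simpa using congrArg List.head? hcontra))
              rw [hPh]
              simp [lexLt, decide_eq_false hr_t]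
          rw [List.countP_congr hcongr, K])]
      cases hA : isAZ t with
      | true =>
          simp only [Bool.true_and]
          refine (congrArg (fun z => 26 ^ T'.length * lowerN t + z)
            (ih (fun h => P (t :: h)) (by
              intro h' hlen' hne'
              show P (t :: h') = lexLt h' T'
              have hPh := hP (t :: h') (by simp [hlen']) (by simp [hne'])
              rw [hPh]
              simp [lexLt, decide_eq_false (lt_irrefl t), decide_eq_true (rfl : t = t)]))).trans ?_
          simp only [CL, hA, if_true, List.all_cons, Bool.true_and]
          ring
      | false =>
          simp only [Bool.false_and]
          have hzero : List.countP (fun _ => false) (List.range (26 ^ T'.length)) = 0 :=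
            List.countP_eq_zero.mpr (by intro a _; simp)
          rw [hzero]
          simp only [CL, hA, if_false, List.all_cons, Bool.false_and, Bool.false_eq_true]
          simp
          ring

-- combining the two counted values under `mod` -------------------------------
lemma FIN (bAll bLe : Bool) (n : Nat) :
    PySem.Int.mod (0 + ((n + if bAll && bLe then 1 else 0 : Nat) : Int)) 998244353
      = PySem.Int.mod (if (((0:Int) + (n:Int), bAll) : Int × Bool).2 then
          (if bLe then (((0:Int) + (n:Int), bAll) : Int × Bool).1 + 1
           else (((0:Int) + (n:Int), bAll) : Int × Bool).1)
        else (((0:Int) + (n:Int), bAll) : Int × Bool).1) 998244353 := by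
  cases bAll <;> cases bLe <;> simp <;> congr 1 <;> push_cast <;> ring

-- the per-test-case equality: A's counting loop value = B's formula value ---
lemma CASECNT (N : Int) (S : List Char) (hN : -1 ≤ N) (hle : N ≤ (S.length : Int)) :
    ((PySem.List.pyRange 0 ((26:Int) ^ (PySem.Int.floordiv (N + 1) 2).toNat) 1).foldl
      (fun count i =>
        if pyStrLe
            (if PySem.Int.mod N 2 = 0 then
              ((PySem.List.pyRange 0 (PySem.Int.floordiv (N + 1) 2) 1).foldl
                (fun (st : List Char × Int) _j =>
                  (st.1 ++ [Char.ofNat ((PySem.Int.mod st.2 26).toNat + 65)],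
                   PySem.Int.floordiv st.2 26)) (([] : List Char), i)).1
                ++ ((PySem.List.pyRange 0 (PySem.Int.floordiv (N + 1) 2) 1).foldl
                (fun (st : List Char × Int) _j =>
                  (st.1 ++ [Char.ofNat ((PySem.Int.mod st.2 26).toNat + 65)],
                   PySem.Int.floordiv st.2 26)) (([] : List Char), i)).1.reverse
             else
              ((PySem.List.pyRange 0 (PySem.Int.floordiv (N + 1) 2) 1).foldl
                (fun (st : List Char × Int) _j =>
                  (st.1 ++ [Char.ofNat ((PySem.Int.mod st.2 26).toNat + 65)],
                   PySem.Int.floordiv st.2 26)) (([] : List Char), i)).1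
                ++ ((PySem.List.pyRange 0 (PySem.Int.floordiv (N + 1) 2) 1).foldl
                (fun (st : List Char × Int) _j =>
                  (st.1 ++ [Char.ofNat ((PySem.Int.mod st.2 26).toNat + 65)],
                   PySem.Int.floordiv st.2 26)) (([] : List Char), i)).1.dropLast.reverse) S
        then PySem.Int.mod (count + 1) 998244353 else count) 0)
    = PySem.Int.mod
        (if ((PySem.List.enumerate (PySem.List.slice S none (some (PySem.Int.floordiv (N + 1) 2))) 0).foldl
              (fun (st : Int × Bool) jc =>
                if st.2 then
                  (st.1 + min (max ((jc.2.toNat : Int) - 65) 0) 26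
                    * (26:Int) ^ (PySem.Int.floordiv (N + 1) 2 - 1 - jc.1).toNat,
                   decide ('A' ≤ jc.2 ∧ jc.2 ≤ 'Z'))
                else st) (0, true)).2 then
          (if pyStrLe
              (if PySem.Int.mod N 2 = 0 then
                PySem.List.slice S none (some (PySem.Int.floordiv (N + 1) 2))
                  ++ (PySem.List.slice S none (some (PySem.Int.floordiv (N + 1) 2))).reverse
               else
                PySem.List.slice S none (some (PySem.Int.floordiv (N + 1) 2))
                  ++ (PySem.List.slice S none (some (PySem.Int.floordiv (N + 1) 2))).dropLast.reverse) S
           then ((PySem.List.enumerate (PySem.List.slice S none (some (PySem.Int.floordiv (N + 1) 2))) 0).foldl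
              (fun (st : Int × Bool) jc =>
                if st.2 then
                  (st.1 + min (max ((jc.2.toNat : Int) - 65) 0) 26
                    * (26:Int) ^ (PySem.Int.floordiv (N + 1) 2 - 1 - jc.1).toNat,
                   decide ('A' ≤ jc.2 ∧ jc.2 ≤ 'Z'))
                else st) (0, true)).1 + 1
           else ((PySem.List.enumerate (PySem.List.slice S none (some (PySem.Int.floordiv (N + 1) 2))) 0).foldl
              (fun (st : Int × Bool) jc =>
                if st.2 then
                  (st.1 + min (max ((jc.2.toNat : Int) - 65) 0) 26
                    * (26:Int) ^ (PySem.Int.floordiv (N + 1) 2 - 1 - jc.1).toNat,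
                   decide ('A' ≤ jc.2 ∧ jc.2 ≤ 'Z'))
                else st) (0, true)).1)
        else ((PySem.List.enumerate (PySem.List.slice S none (some (PySem.Int.floordiv (N + 1) 2))) 0).foldl
              (fun (st : Int × Bool) jc =>
                if st.2 then
                  (st.1 + min (max ((jc.2.toNat : Int) - 65) 0) 26
                    * (26:Int) ^ (PySem.Int.floordiv (N + 1) 2 - 1 - jc.1).toNat,
                   decide ('A' ≤ jc.2 ∧ jc.2 ≤ 'Z'))
                else st) (0, true)).1)
        998244353 := by
  have h0 : (0:Int) ≤ PySem.Int.floordiv (N + 1) 2 := by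
    rw [PySem.Int.floordiv_eq_ediv_of_pos (by norm_num : (0:Int) < 2)]; omega
  have hhalfle : PySem.Int.floordiv (N + 1) 2 ≤ (S.length : Int) := by
    rw [PySem.Int.floordiv_eq_ediv_of_pos (by norm_num : (0:Int) < 2)]; omega
  set half : Int := PySem.Int.floordiv (N + 1) 2 with hhalf
  set hl : Nat := half.toNat with hhl
  have hcast : (hl : Int) = half := Int.toNat_of_nonneg h0
  have hlS : hl ≤ S.length := by omega
  set pfx : List Char := PySem.List.slice S none (some half) with hpfxdef
  have hpfx_take : pfx = S.take hl := PySem.List.slice_to _ h0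
  have hlen_pfx : pfx.length = hl := by rw [hpfx_take]; simp [hlS]
  have hB1 := B1 half pfx 0 0 (by rw [hlen_pfx, hcast]; ring)
  have hbody : ∀ (count : Int) (i : Int), i ∈ PySem.List.pyRange 0 ((26:Int) ^ hl) 1 →
      (fun count i =>
        if pyStrLe
            (if PySem.Int.mod N 2 = 0 then
              ((PySem.List.pyRange 0 half 1).foldl
                (fun (st : List Char × Int) _j =>
                  (st.1 ++ [Char.ofNat ((PySem.Int.mod st.2 26).toNat + 65)],
                   PySem.Int.floordiv st.2 26)) (([] : List Char), i)).1
                ++ ((PySem.List.pyRange 0 half 1).foldl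
                (fun (st : List Char × Int) _j =>
                  (st.1 ++ [Char.ofNat ((PySem.Int.mod st.2 26).toNat + 65)],
                   PySem.Int.floordiv st.2 26)) (([] : List Char), i)).1.reverse
             else
              ((PySem.List.pyRange 0 half 1).foldl
                (fun (st : List Char × Int) _j =>
                  (st.1 ++ [Char.ofNat ((PySem.Int.mod st.2 26).toNat + 65)],
                   PySem.Int.floordiv st.2 26)) (([] : List Char), i)).1
                ++ ((PySem.List.pyRange 0 half 1).foldl
                (fun (st : List Char × Int) _j =>
                  (st.1 ++ [Char.ofNat ((PySem.Int.mod st.2 26).toNat + 65)],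
                   PySem.Int.floordiv st.2 26)) (([] : List Char), i)).1.dropLast.reverse) S
        then PySem.Int.mod (count + 1) 998244353 else count) count i
      = (fun count (i : Int) =>
          if pyStrLe (palF N (decN hl i.toNat)) S
          then PySem.Int.mod (count + 1) 998244353 else count) count i := by
    intro count i hi
    have hi0 : 0 ≤ i := by
      have := (PySem.List.mem_pyRange_one.mp hi).1; omega
    have hlenr : (PySem.List.pyRange 0 half 1).length = hl := by
      rw [PySem.List.length_pyRange_one]; omega
    have hfh := A1 (PySem.List.pyRange 0 half 1) [] i hi0
    rw [hlenr] at hfh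
    simp only [hfh, List.nil_append, palF]
    rfl
  refine Eq.trans (PySem.List.foldl_congr_mem _ _ _ 0 hbody) ?_
  refine Eq.trans (A2 (PySem.List.pyRange 0 ((26:Int) ^ hl) 1)
    (fun i => pyStrLe (palF N (decN hl i.toNat)) S) 0 le_rfl (by norm_num)) ?_
  have hpow : (((26:Int) ^ hl) - 0).toNat = 26 ^ hl := by
    rw [sub_zero, show ((26:Int) ^ hl) = ((26 ^ hl : Nat) : Int) by push_cast; ring]
    exact Int.toNat_natCast _
  have hcount : (PySem.List.pyRange 0 ((26:Int) ^ hl) 1).countP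
        (fun i => pyStrLe (palF N (decN hl i.toNat)) S)
      = (List.range (26 ^ hl)).countP (fun k => pyStrLe (palF N (decN hl k)) S) := by
    rw [PySem.List.pyRange_one, hpow, List.countP_map]
    apply List.countP_congr
    intro k _
    simp [Function.comp]
  rw [hcount]
  have hG : (List.range (26 ^ hl)).countP (fun k => pyStrLe (palF N (decN hl k)) S)
      = CL pfx + (if pfx.all isAZ && pyStrLe (palF N pfx) S then 1 else 0) := by
    have hg0 := G pfx (fun h => pyStrLe (palF N h) S) (by
      intro h hlh hne
      show pyStrLe (palF N h) S = lexLt h pfx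
      have hlh' : h.length = hl := by rw [hlh, hlen_pfx]
      have htake : (palF N h).take hl = h := by
        have htk : ∀ r : List Char, (h ++ r).take hl = h := by
          intro r
          rw [← hlh', List.take_left]
        unfold palF
        split <;> exact htk _
      have hXlen : hl ≤ (palF N h).length := by
        unfold palF
        split <;> simp [List.length_append] <;> omega
      have hStake : S.take hl = pfx := hpfx_take.symm
      have hld := LD hl (palF N h) S hXlen hlS (by rw [htake, hStake]; exact hne)
      rw [hld, htake, hStake])
    rw [hlen_pfx] at hg0
    exact hg0
  rw [hG, hB1]
  exact FIN (pfx.all isAZ) (pyStrLe (palF N pfx) S) (CL pfx)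

-- one full test case --------------------------------------------------------
lemma CASEFULL (N : Int) (Sstr : String) (acc : List Int) (hN : -1 ≤ N) :
    (if N > ((Sstr.toList).length : Int) then acc ++ [0]
     else acc ++ [((PySem.List.pyRange 0 ((26:Int) ^ (PySem.Int.floordiv (N + 1) 2).toNat) 1).foldl
      (fun count i =>
        if pyStrLe
            (if PySem.Int.mod N 2 = 0 then
              ((PySem.List.pyRange 0 (PySem.Int.floordiv (N + 1) 2) 1).foldl
                (fun (st : List Char × Int) _j =>
                  (st.1 ++ [Char.ofNat ((PySem.Int.mod st.2 26).toNat + 65)],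
                   PySem.Int.floordiv st.2 26)) (([] : List Char), i)).1
                ++ ((PySem.List.pyRange 0 (PySem.Int.floordiv (N + 1) 2) 1).foldl
                (fun (st : List Char × Int) _j =>
                  (st.1 ++ [Char.ofNat ((PySem.Int.mod st.2 26).toNat + 65)],
                   PySem.Int.floordiv st.2 26)) (([] : List Char), i)).1.reverse
             else
              ((PySem.List.pyRange 0 (PySem.Int.floordiv (N + 1) 2) 1).foldl
                (fun (st : List Char × Int) _j =>
                  (st.1 ++ [Char.ofNat ((PySem.Int.mod st.2 26).toNat + 65)],
                   PySem.Int.floordiv st.2 26)) (([] : List Char), i)).1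
                ++ ((PySem.List.pyRange 0 (PySem.Int.floordiv (N + 1) 2) 1).foldl
                (fun (st : List Char × Int) _j =>
                  (st.1 ++ [Char.ofNat ((PySem.Int.mod st.2 26).toNat + 65)],
                   PySem.Int.floordiv st.2 26)) (([] : List Char), i)).1.dropLast.reverse) (Sstr.toList)
        then PySem.Int.mod (count + 1) 998244353 else count) 0)])
    = (if N > ((Sstr.toList).length : Int) then acc ++ [0]
       else acc ++ [PySem.Int.mod
        (if ((PySem.List.enumerate (PySem.List.slice (Sstr.toList) none (some (PySem.Int.floordiv (N + 1) 2))) 0).foldl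
              (fun (st : Int × Bool) jc =>
                if st.2 then
                  (st.1 + min (max ((jc.2.toNat : Int) - 65) 0) 26
                    * (26:Int) ^ (PySem.Int.floordiv (N + 1) 2 - 1 - jc.1).toNat,
                   decide ('A' ≤ jc.2 ∧ jc.2 ≤ 'Z'))
                else st) (0, true)).2 then
          (if pyStrLe
              (if PySem.Int.mod N 2 = 0 then
                PySem.List.slice (Sstr.toList) none (some (PySem.Int.floordiv (N + 1) 2))
                  ++ (PySem.List.slice (Sstr.toList) none (some (PySem.Int.floordiv (N + 1) 2))).reverse
               else
                PySem.List.slice (Sstr.toList) none (some (PySem.Int.floordiv (N + 1) 2))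
                  ++ (PySem.List.slice (Sstr.toList) none (some (PySem.Int.floordiv (N + 1) 2))).dropLast.reverse) (Sstr.toList)
           then ((PySem.List.enumerate (PySem.List.slice (Sstr.toList) none (some (PySem.Int.floordiv (N + 1) 2))) 0).foldl
              (fun (st : Int × Bool) jc =>
                if st.2 then
                  (st.1 + min (max ((jc.2.toNat : Int) - 65) 0) 26
                    * (26:Int) ^ (PySem.Int.floordiv (N + 1) 2 - 1 - jc.1).toNat,
                   decide ('A' ≤ jc.2 ∧ jc.2 ≤ 'Z'))
                else st) (0, true)).1 + 1
           else ((PySem.List.enumerate (PySem.List.slice (Sstr.toList) none (some (PySem.Int.floordiv (N + 1) 2))) 0).foldl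
              (fun (st : Int × Bool) jc =>
                if st.2 then
                  (st.1 + min (max ((jc.2.toNat : Int) - 65) 0) 26
                    * (26:Int) ^ (PySem.Int.floordiv (N + 1) 2 - 1 - jc.1).toNat,
                   decide ('A' ≤ jc.2 ∧ jc.2 ≤ 'Z'))
                else st) (0, true)).1)
        else ((PySem.List.enumerate (PySem.List.slice (Sstr.toList) none (some (PySem.Int.floordiv (N + 1) 2))) 0).foldl
              (fun (st : Int × Bool) jc =>
                if st.2 then
                  (st.1 + min (max ((jc.2.toNat : Int) - 65) 0) 26
                    * (26:Int) ^ (PySem.Int.floordiv (N + 1) 2 - 1 - jc.1).toNat,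
                   decide ('A' ≤ jc.2 ∧ jc.2 ≤ 'Z'))
                else st) (0, true)).1)
        998244353]) := by
  by_cases hgt : N > ((Sstr.toList).length : Int)
  · rw [if_pos hgt, if_pos hgt]
  · rw [if_neg hgt, if_neg hgt]
    have hle : N ≤ ((Sstr.toList).length : Int) := by omega
    rw [CASECNT N Sstr.toList hN hle]

-- the whole run -------------------------------------------------------------
lemma MAIN (tcs : List (Int × String)) (acc : List Int)
    (hpre : ∀ p ∈ tcs, (-1 : Int) ≤ p.1) :
    tcs.foldl (fun results nc =>
      let N := nc.1
      let S := nc.2.toList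
      if N > (S.length : Int) then results ++ [0]
      else
        let half : Int := PySem.Int.floordiv (N + 1) 2
        let count : Int := (PySem.List.pyRange 0 ((26:Int) ^ half.toNat) 1).foldl (fun count i =>
          let fh := ((PySem.List.pyRange 0 half 1).foldl
              (fun (st : List Char × Int) _j =>
                (st.1 ++ [Char.ofNat ((PySem.Int.mod st.2 26).toNat + 65)], PySem.Int.floordiv st.2 26))
              (([] : List Char), i)).1
          let palindrome := if PySem.Int.mod N 2 = 0 then fh ++ fh.reverse else fh ++ fh.dropLast.reverse
          if pyStrLe palindrome S then PySem.Int.mod (count + 1) 998244353 else count) 0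
        results ++ [count]) acc
    = tcs.foldl (fun results nc =>
        let N := nc.1
        let S := nc.2.toList
        if N > (S.length : Int) then results ++ [0]
        else
          let half : Int := PySem.Int.floordiv (N + 1) 2
          let pfx := PySem.List.slice S none (some half)
          let st := (PySem.List.enumerate pfx 0).foldl
            (fun (st : Int × Bool) jc =>
              if st.2 then
                (st.1 + min (max ((jc.2.toNat : Int) - 65) 0) 26 * (26:Int) ^ (half - 1 - jc.1).toNat,
                 decide ('A' ≤ jc.2 ∧ jc.2 ≤ 'Z'))
              else st) (0, true)
          let total :=
            if st.2 then
              let pal := if PySem.Int.mod N 2 = 0 then pfx ++ pfx.reverse else pfx ++ pfx.dropLast.reverse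
              if pyStrLe pal S then st.1 + 1 else st.1
            else st.1
          results ++ [PySem.Int.mod total 998244353]) acc := by
  induction tcs generalizing acc with
  | nil => rfl
  | cons nc tl ih =>
      rw [List.foldl_cons, List.foldl_cons]
      have hN : (-1:Int) ≤ nc.1 := hpre nc (by simp)
      have hstep :
          (let N := nc.1
           let S := nc.2.toList
           if N > (S.length : Int) then acc ++ [0]
           else
             let half : Int := PySem.Int.floordiv (N + 1) 2
             let count : Int := (PySem.List.pyRange 0 ((26:Int) ^ half.toNat) 1).foldl (fun count i =>
               let fh := ((PySem.List.pyRange 0 half 1).foldl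
                   (fun (st : List Char × Int) _j =>
                     (st.1 ++ [Char.ofNat ((PySem.Int.mod st.2 26).toNat + 65)], PySem.Int.floordiv st.2 26))
                   (([] : List Char), i)).1
               let palindrome := if PySem.Int.mod N 2 = 0 then fh ++ fh.reverse else fh ++ fh.dropLast.reverse
               if pyStrLe palindrome S then PySem.Int.mod (count + 1) 998244353 else count) 0
             acc ++ [count])
        = (let N := nc.1
           let S := nc.2.toList
           if N > (S.length : Int) then acc ++ [0]
           else
             let half : Int := PySem.Int.floordiv (N + 1) 2
             let pfx := PySem.List.slice S none (some half)
             let st := (PySem.List.enumerate pfx 0).foldl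
               (fun (st : Int × Bool) jc =>
                 if st.2 then
                   (st.1 + min (max ((jc.2.toNat : Int) - 65) 0) 26 * (26:Int) ^ (half - 1 - jc.1).toNat,
                    decide ('A' ≤ jc.2 ∧ jc.2 ≤ 'Z'))
                 else st) (0, true)
             let total :=
               if st.2 then
                 let pal := if PySem.Int.mod N 2 = 0 then pfx ++ pfx.reverse else pfx ++ pfx.dropLast.reverse
                 if pyStrLe pal S then st.1 + 1 else st.1
               else st.1
             acc ++ [PySem.Int.mod total 998244353]) := CASEFULL nc.1 nc.2 acc hN
      rw [hstep]
      exact ih _ (fun p hp => hpre p (List.mem_cons_of_mem _ hp))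

-- ===== VERDICT (by name: the statement is the Claim_ definition above) =====
theorem count_palindromic_strings_spec : Claim_equal_count_palindromic_strings := by
  intro T tcs _hDom hPre
  unfold Spec_count_palindromic_strings count_palindromic_strings count_palindromic_strings_alt
  exact MAIN tcs [] hPre
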